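-- pv_equiv track=rewrite | github.com/AliAnsariArshad/LeetCode | problems/Easy/Array[list]/MergeSimilarItems.py | merge_similar_items3
-- ===== SOURCE A (Python) =====
-- from typing import List
--
-- def merge_similar_items3(items1: List[List[int]], items2: List[List[int]]):
--     d = {}
--     for i in range(len(items1)):
--         if items1[i][0] in d:
--             d[items1[i][0]] += items1[i][1]
--         else:
--             d[items1[i][0]] = items1[i][1]
--     for i in range(len(items2)):
--         if items2[i][0] in d:
--             d[items2[i][0]] += items2[i][1]
--         else:
--             d[items2[i][0]] = items2[i][1]
--     return sorted(d.items())
-- ===== SOURCE B (Python) =====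
-- def merge_similar_items3(items1, items2):
--     merged = sorted(items1 + items2, key=lambda it: it[0])
--     res = []
--     i, n = 0, len(merged)
--     while i < n:
--         k, s = merged[i][0], 0
--         while i < n and merged[i][0] == k:
--             s += merged[i][1]
--             i += 1
--         res.append((k, s))
--     return res
-- ===== Notes on version B (the rewrite author's own statement) =====
-- stated objective: alternative
-- what changed: Replaces A's hash-map accumulation over index loops plus a final sort of the dict items by a concatenate, sort-by-key, then single grouping scan that sums each run of equal keys.
import Mathlib
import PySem

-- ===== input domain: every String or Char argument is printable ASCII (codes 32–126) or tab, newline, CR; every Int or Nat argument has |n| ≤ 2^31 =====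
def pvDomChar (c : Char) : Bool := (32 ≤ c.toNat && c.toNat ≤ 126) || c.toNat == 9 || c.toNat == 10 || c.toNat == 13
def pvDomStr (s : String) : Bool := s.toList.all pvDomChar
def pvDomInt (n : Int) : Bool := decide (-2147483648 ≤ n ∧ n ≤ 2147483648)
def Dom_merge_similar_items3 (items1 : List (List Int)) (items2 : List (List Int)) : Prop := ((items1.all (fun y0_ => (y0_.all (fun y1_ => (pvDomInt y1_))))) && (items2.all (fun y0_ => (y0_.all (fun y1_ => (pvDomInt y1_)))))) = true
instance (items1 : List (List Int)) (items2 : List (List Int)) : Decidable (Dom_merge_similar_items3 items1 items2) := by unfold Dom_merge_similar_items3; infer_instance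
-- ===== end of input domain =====

-- B replaces A's dictionary accumulation by concatenate-sort-then-one-grouping-scan; same return value (alternative decomposition, no speed claim).

-- ===== PORT A =====
-- it[0] / it[1] of a row (defaults never reached under Pre_, which demands rows of length ≥ 2)
def pvKey (it : List Int) : Int := PySem.List.pyGetD it 0 0
def pvWt (it : List Int) : Int := PySem.List.pyGetD it 1 0

-- body of A's two identical loops: if items[i][0] in d: d[...] += items[i][1] else: d[...] = items[i][1]
def pvStepA (items : List (List Int)) (d : PySem.Dict Int Int) (i : Int) : PySem.Dict Int Int :=
  let it := PySem.List.pyGetD items i []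
  if d.contains (pvKey it) then d.insert (pvKey it) (d.getD (pvKey it) 0 + pvWt it)
  else d.insert (pvKey it) (pvWt it)

def merge_similar_items3 (items1 : List (List Int)) (items2 : List (List Int)) : List (Int × Int) :=
  let d1 := (PySem.List.pyRange 0 (items1.length : Int) 1).foldl (pvStepA items1) PySem.Dict.empty
  let d2 := (PySem.List.pyRange 0 (items2.length : Int) 1).foldl (pvStepA items2) d1
  PySem.List.sorted2 d2.items (fun p => p.1) (fun p => p.2) false

-- ===== PORT B =====
-- outer while of Source B: take one run of equal keys (inner while = takeWhile/dropWhile), emit (key, run sum)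
def pvGrpB : List (List Int) → List (Int × Int)
  | [] => []
  | it :: rest =>
    let k := pvKey it
    (k, pvWt it + ((rest.takeWhile (fun j => pvKey j == k)).map pvWt).sum)
      :: pvGrpB (rest.dropWhile (fun j => pvKey j == k))
termination_by l => l.length
decreasing_by
  exact Nat.lt_succ_of_le (List.Sublist.length_le (List.dropWhile_sublist _))

def merge_similar_items3_alt (items1 : List (List Int)) (items2 : List (List Int)) : List (Int × Int) :=
  pvGrpB (PySem.List.sorted (items1 ++ items2) (fun it => PySem.List.pyGetD it 0 0) false)

-- ===== PRECONDITION & SPEC =====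
-- Pre_ excludes inputs containing a row of fewer than two ints: there the Python A raises IndexError (items[i][0] or items[i][1]); B raises there too.
def Pre_merge_similar_items3 (items1 : List (List Int)) (items2 : List (List Int)) : Prop :=
  ∀ l ∈ items1 ++ items2, 2 ≤ l.length
instance (items1 : List (List Int)) (items2 : List (List Int)) : Decidable (Pre_merge_similar_items3 items1 items2) := by unfold Pre_merge_similar_items3; infer_instance

def pvWitness_merge_similar_items3 : List (List Int) × List (List Int) := ([[1, 2], [3, 4]], [[1, 5]])

def Spec_merge_similar_items3 (items1 : List (List Int)) (items2 : List (List Int)) (out : List (Int × Int)) : Prop := out = merge_similar_items3_alt items1 items2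
instance (items1 : List (List Int)) (items2 : List (List Int)) (out : List (Int × Int)) : Decidable (Spec_merge_similar_items3 items1 items2 out) := by unfold Spec_merge_similar_items3; infer_instance

-- ===== CLAIM (what is proved, stated in full; the proofs are below) =====
def Claim_equal_merge_similar_items3 : Prop := ∀ (items1 : List (List Int)) (items2 : List (List Int)), Dom_merge_similar_items3 items1 items2 → Pre_merge_similar_items3 items1 items2 → Spec_merge_similar_items3 items1 items2 (merge_similar_items3 items1 items2)

-- ===== LEMMAS AND PROOFS =====

-- the merged insert step A's branches amount to
def pvStep2 (d : PySem.Dict Int Int) (it : List Int) : PySem.Dict Int Int :=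
  d.insert (pvKey it) (d.getD (pvKey it) 0 + pvWt it)

-- sum of weights of rows with key c
def pvS (l : List (List Int)) (c : Int) : Int :=
  ((l.filter (fun it => pvKey it == c)).map pvWt).sum

lemma pvStepA_eq (items : List (List Int)) (d : PySem.Dict Int Int) (i : Int) :
    pvStepA items d i = pvStep2 d (PySem.List.pyGetD items i []) := by
  by_cases h : d.contains (pvKey (PySem.List.pyGetD items i [])) = true
  · simp [pvStepA, pvStep2, h]
  · simp only [pvStepA, pvStep2, h, if_false, Bool.false_eq_true]
    rw [PySem.Dict.getD_of_not_contains _ _ (by simpa using h), zero_add]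

lemma pvDictA (items1 items2 : List (List Int)) :
    (PySem.List.pyRange 0 (items2.length : Int) 1).foldl (pvStepA items2)
      ((PySem.List.pyRange 0 (items1.length : Int) 1).foldl (pvStepA items1) PySem.Dict.empty)
    = (items1 ++ items2).foldl pvStep2 PySem.Dict.empty := by
  have h1 : ∀ (items : List (List Int)) (d : PySem.Dict Int Int),
      (PySem.List.pyRange 0 (items.length : Int) 1).foldl (pvStepA items) d
        = items.foldl pvStep2 d := by
    intro items d
    have hf : pvStepA items = fun acc j => pvStep2 acc (PySem.List.pyGetD items j []) :=
      funext fun acc => funext fun j => pvStepA_eq items acc j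
    rw [hf, PySem.List.foldl_pyRange_zero_pyGetD' items [] pvStep2 d]
  rw [h1, h1, List.foldl_append]

lemma pvGetD_foldl (l : List (List Int)) (d : PySem.Dict Int Int) (c : Int) :
    (l.foldl pvStep2 d).getD c 0 = d.getD c 0 + pvS l c := by
  induction l generalizing d with
  | nil => simp [pvS]
  | cons x xs ih =>
    rw [List.foldl_cons, ih]
    by_cases h : pvKey x = c
    · simp [pvS, pvStep2, h]
      ring
    · simp [pvS, pvStep2, PySem.Dict.getD_insert, h, Ne.symm h]

lemma pvKeys_foldl (l : List (List Int)) :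
    (l.foldl pvStep2 PySem.Dict.empty).keys = PySem.Set.ofList (l.map pvKey) := by
  have := PySem.Dict.keys_foldl_insert_key l pvKey
      (fun d it => d.getD (pvKey it) 0 + pvWt it) PySem.Dict.empty
  simpa [pvStep2, PySem.Set.update_nil_left] using this

lemma pvItems_foldl (l : List (List Int)) :
    (l.foldl pvStep2 PySem.Dict.empty).items
      = (PySem.Set.ofList (l.map pvKey)).map (fun c => (c, pvS l c)) := by
  have hnd : (l.foldl pvStep2 PySem.Dict.empty).keys.Nodup := by
    rw [pvKeys_foldl]; exact PySem.Set.nodup_ofList _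
  rw [PySem.Dict.items_eq_map_keys _ hnd 0, pvKeys_foldl]
  exact List.map_congr_left (by
    intro c _
    rw [pvGetD_foldl]
    simp)

-- insertion with comparators that agree on the inserted element vs the list
lemma pvInsertBy_congr {α : Type} (b1 b2 : α → α → Bool) (x : α) (ys : List α)
    (h : ∀ y ∈ ys, b1 x y = b2 x y) :
    PySem.List.insertBy b1 x ys = PySem.List.insertBy b2 x ys := by
  induction ys with
  | nil => rfl
  | cons y ys ih =>
    simp only [PySem.List.insertBy]
    rw [h y (by simp)]
    by_cases hb : b2 x y = true
    · simp [hb]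
    · simp [hb, ih (fun z hz => h z (by simp [hz]))]

lemma pvFoldl_insertBy_congr {α : Type} (b1 b2 : α → α → Bool) :
    ∀ (l acc : List α), (∀ a ∈ l, ∀ b ∈ l ++ acc, b1 a b = b2 a b) →
    l.foldl (fun acc x => PySem.List.insertBy b1 x acc) acc
      = l.foldl (fun acc x => PySem.List.insertBy b2 x acc) acc := by
  intro l
  induction l with
  | nil => intro acc _; rfl
  | cons x xs ih =>
    intro acc h
    simp only [List.foldl_cons]
    rw [pvInsertBy_congr b1 b2 x acc (fun y hy => h x (by simp) y (by simp [hy]))]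
    apply ih
    intro a ha b hb
    have hb' : b ∈ x :: xs ++ acc := by
      rcases List.mem_append.mp hb with hb | hb
      · exact List.mem_append_left _ (by simp [hb])
      · rcases (PySem.List.mem_insertBy _ _ _ _).mp hb with rfl | hb
        · simp
        · exact List.mem_append_right _ hb
    exact h a (by simp [ha]) b hb'

-- sorted with a tuple key whose first component separates the elements = sorted by the first component
lemma pvSorted2_eq_sorted {α : Type} (l : List α) (k1 k2 : α → Int)
    (hinj : ∀ a ∈ l, ∀ b ∈ l, k1 a = k1 b → a = b) :
    PySem.List.sorted2 l k1 k2 false = PySem.List.sorted l k1 false := by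
  simp only [PySem.List.sorted2, PySem.List.sorted]
  apply pvFoldl_insertBy_congr
  intro a ha b hb
  simp only [List.append_nil] at hb
  rcases lt_trichotomy (k1 a) (k1 b) with h | h | h
  · simp [h]
  · have : a = b := hinj a ha b hb h
    subst this
    simp
  · simp [not_lt_of_gt h, h]

lemma pvOfList_sublist {α : Type} [BEq α] [LawfulBEq α] (l : List α) :
    (PySem.Set.ofList l).Sublist l := by
  induction l with
  | nil => simp [PySem.Set.ofList_nil]
  | cons x xs ih =>
    rw [PySem.Set.ofList_cons]
    exact List.Sublist.cons₂ x (List.Sublist.trans List.filter_sublist ih)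

-- first-occurrence dedup of a ≤-sorted list is <-sorted
lemma pvOfList_pairwise_lt (l : List Int) (h : l.Pairwise (· ≤ ·)) :
    (PySem.Set.ofList l).Pairwise (· < ·) := by
  have hle : (PySem.Set.ofList l).Pairwise (· ≤ ·) := List.Pairwise.sublist (pvOfList_sublist l) h
  have hnd : (PySem.Set.ofList l).Nodup := PySem.Set.nodup_ofList l
  have := hle.and hnd
  exact this.imp (by rintro a b ⟨h1, h2⟩; exact lt_of_le_of_ne h1 h2)

-- set(k :: run ++ rest) = k :: set(rest) when run is all k's and k not in rest
lemma pvOfList_cons_run (k : Int) (l1 l2 : List Int)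
    (h1 : ∀ x ∈ l1, x = k) (h2 : k ∉ l2) :
    PySem.Set.ofList (k :: l1 ++ l2) = k :: PySem.Set.ofList l2 := by
  have hu1 : PySem.Set.update [k] l1 = [k] := by
    induction l1 with
    | nil => rfl
    | cons x xs ih =>
      rw [PySem.Set.update_cons]
      have : x = k := h1 x (by simp)
      subst this
      rw [PySem.Set.add_of_mem (by simp)]
      exact ih (fun y hy => h1 y (by simp [hy]))
  have : PySem.Set.ofList (k :: l1 ++ l2) = PySem.Set.update [k] (l1 ++ l2) := by
    rw [← PySem.Set.update_nil_left, List.cons_append, PySem.Set.update_cons]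
    rfl
  rw [this, PySem.Set.update_append, hu1, PySem.Set.update_eq_append_filter]
  have : List.filter (fun y => !PySem.Set.contains [k] y) (PySem.Set.ofList l2)
      = PySem.Set.ofList l2 := by
    apply List.filter_eq_self.mpr
    intro y hy
    have : y ∈ l2 := (PySem.Set.mem_ofList _ _).mp hy
    have hne : y ≠ k := fun hk => h2 (hk ▸ this)
    simp [PySem.Set.contains, hne]
  rw [this]
  rfl

-- keys after the dropWhile of a run at the minimum k are all different from k
lemma pvDropWhile_keys (k : Int) :
    ∀ (rest : List (List Int)), (rest.map pvKey).Pairwise (· ≤ ·) →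
      (∀ y ∈ rest.map pvKey, k ≤ y) →
      ∀ j ∈ rest.dropWhile (fun j => pvKey j == k), pvKey j ≠ k := by
  intro rest
  induction rest with
  | nil => intro _ _ j hj; simp at hj
  | cons x t ih =>
    intro hpw hk j hj
    by_cases hx : pvKey x = k
    · rw [List.dropWhile_cons, if_pos (by simp [hx])] at hj
      simp only [List.map_cons, List.pairwise_cons] at hpw
      exact ih hpw.2 (fun y hy => hk y (by simp [hy])) j hj
    · rw [List.dropWhile_cons, if_neg (by simp [hx])] at hj
      rcases List.mem_cons.mp hj with rfl | hj
      · exact hx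
      · simp only [List.map_cons, List.pairwise_cons] at hpw
        have h1 : pvKey x ≤ pvKey j := hpw.1 _ (List.mem_map_of_mem hj)
        have h2 : k ≤ pvKey x := hk _ (by simp)
        have : k < pvKey j := lt_of_lt_of_le (lt_of_le_of_ne h2 (Ne.symm hx)) h1
        omega

-- grouping scan over a key-sorted list returns one (key, sum) pair per distinct key, in order
lemma pvGrpB_eq_aux : ∀ (n : Nat) (zs : List (List Int)), zs.length ≤ n →
    (zs.map pvKey).Pairwise (· ≤ ·) →
    pvGrpB zs = (PySem.Set.ofList (zs.map pvKey)).map (fun c => (c, pvS zs c)) := by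
  intro n
  induction n with
  | zero =>
    intro zs hlen _
    rw [List.length_eq_zero_iff.mp (Nat.le_zero.mp hlen)]
    simp [pvGrpB, PySem.Set.ofList_nil]
  | succ n ihn =>
    intro zs hlen h
    match zs with
    | [] => simp [pvGrpB, PySem.Set.ofList_nil]
    | it :: rest =>
    set k := pvKey it with hkdef
    set p : List Int → Bool := fun j => pvKey j == k with hpdef
    set run := rest.takeWhile p with hrdef
    set rest' := rest.dropWhile p with hr'def
    have hsplit : run ++ rest' = rest := List.takeWhile_append_dropWhile
    simp only [List.map_cons, List.pairwise_cons] at h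
    obtain ⟨hk_le, htail⟩ := h
    have hrunk : ∀ j ∈ run, pvKey j = k := by
      intro j hj
      have := List.mem_takeWhile_imp hj
      simpa [hpdef] using this
    have hne : ∀ j ∈ rest', pvKey j ≠ k :=
      pvDropWhile_keys k rest htail hk_le
    have hknotin : k ∉ rest'.map pvKey := by
      intro hmem
      rcases List.mem_map.mp hmem with ⟨j, hj, hjk⟩
      exact hne j hj hjk
    -- left-hand side, one unfolding
    have hlhs : pvGrpB (it :: rest)
        = (k, pvWt it + (run.map pvWt).sum) :: pvGrpB rest' := by
      rw [pvGrpB]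
    -- the distinct keys
    have hmap : List.map pvKey (it :: rest) = k :: (run.map pvKey ++ rest'.map pvKey) := by
      rw [List.map_cons, ← hsplit, List.map_append]
    have hset : PySem.Set.ofList (List.map pvKey (it :: rest))
        = k :: PySem.Set.ofList (rest'.map pvKey) := by
      rw [hmap]
      exact pvOfList_cons_run k _ _
        (by intro x hx; rcases List.mem_map.mp hx with ⟨j, hj, rfl⟩; exact hrunk j hj)
        hknotin
    -- head value
    have hfilter_run : run.filter (fun j => pvKey j == k) = run :=
      List.filter_eq_self.mpr (fun j hj => by simp [hrunk j hj])
    have hfilter_rest' : rest'.filter (fun j => pvKey j == k) = [] :=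
      List.filter_eq_nil_iff.mpr (fun j hj => by simp [hne j hj])
    have hhead : pvS (it :: rest) k = pvWt it + (run.map pvWt).sum := by
      rw [pvS, ← hsplit, List.filter_cons, if_pos (by simp [hkdef]),
        List.filter_append, hfilter_run, hfilter_rest', List.append_nil,
        List.map_cons, List.sum_cons]
    -- tail values
    have htailS : ∀ c ∈ PySem.Set.ofList (rest'.map pvKey),
        pvS (it :: rest) c = pvS rest' c := by
      intro c hc
      have hcne : c ≠ k := by
        rcases List.mem_map.mp ((PySem.Set.mem_ofList _ _).mp hc) with ⟨j, hj, rfl⟩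
        exact hne j hj
      have h1 : (pvKey it == c) = false := by simp [hkdef.symm ▸ (Ne.symm hcne)]
      have h2 : run.filter (fun j => pvKey j == c) = [] :=
        List.filter_eq_nil_iff.mpr (fun j hj => by simp [hrunk j hj, Ne.symm hcne])
      rw [pvS, pvS, ← hsplit, List.filter_cons, List.filter_append, h2]
      simp [h1]
    have hpw' : (rest'.map pvKey).Pairwise (· ≤ ·) :=
      List.Pairwise.sublist (List.Sublist.map pvKey (List.dropWhile_sublist p)) htail
    have hlen' : rest'.length ≤ n := by
      have h1 : rest'.length ≤ rest.length := List.Sublist.length_le (List.dropWhile_sublist p)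
      simp only [List.length_cons] at hlen
      omega
    rw [hlhs, ihn rest' hlen' hpw', hset, List.map_cons, hhead]
    congr 1
    exact (List.map_congr_left (fun c hc => by rw [htailS c hc])).symm

lemma pvGrpB_eq (zs : List (List Int)) (h : (zs.map pvKey).Pairwise (· ≤ ·)) :
    pvGrpB zs = (PySem.Set.ofList (zs.map pvKey)).map (fun c => (c, pvS zs c)) :=
  pvGrpB_eq_aux zs.length zs le_rfl h

-- B's value: the grouping scan over sorted(items1 + items2)
lemma pvAlt_eq (items1 items2 : List (List Int)) :
    merge_similar_items3_alt items1 items2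
      = (PySem.List.sorted (PySem.Set.ofList ((items1 ++ items2).map pvKey)) (fun x => x) false).map
          (fun c => (c, pvS (items1 ++ items2) c)) := by
  set xs := items1 ++ items2 with hxs
  set zs := PySem.List.sorted xs pvKey false with hzs
  have hperm : zs.Perm xs := PySem.List.sorted_perm xs pvKey false
  have hzpw : (zs.map pvKey).Pairwise (· ≤ ·) := PySem.List.sorted_map_key_pairwise xs pvKey
  have h1 : merge_similar_items3_alt items1 items2 = pvGrpB zs := rfl
  rw [h1, pvGrpB_eq zs hzpw]
  have hsetzs : PySem.Set.ofList (zs.map pvKey)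
      = PySem.List.sorted (PySem.Set.ofList (xs.map pvKey)) (fun x => x) false := by
    apply (PySem.List.sorted_eq_of_perm_of_pairwise_lt _ _ _ _ _).symm
    · rw [List.perm_ext_iff_of_nodup (PySem.Set.nodup_ofList _) (PySem.Set.nodup_ofList _)]
      intro a
      rw [PySem.Set.mem_ofList, PySem.Set.mem_ofList]
      constructor
      · intro ha; rcases List.mem_map.mp ha with ⟨j, hj, rfl⟩
        exact List.mem_map_of_mem (hperm.mem_iff.mp hj)
      · intro ha; rcases List.mem_map.mp ha with ⟨j, hj, rfl⟩
        exact List.mem_map_of_mem (hperm.mem_iff.mpr hj)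
    · exact pvOfList_pairwise_lt _ hzpw
  have hS : ∀ c, pvS zs c = pvS xs c := by
    intro c
    exact List.Perm.sum_eq (List.Perm.map pvWt (List.Perm.filter _ hperm))
  rw [hsetzs]
  exact List.map_congr_left (fun c _ => by rw [hS])

-- A's value: the same canonical list
lemma pvA_eq (items1 items2 : List (List Int)) :
    merge_similar_items3 items1 items2
      = (PySem.List.sorted (PySem.Set.ofList ((items1 ++ items2).map pvKey)) (fun x => x) false).map
          (fun c => (c, pvS (items1 ++ items2) c)) := by
  set xs := items1 ++ items2 with hxs
  set K := PySem.Set.ofList (xs.map pvKey) with hK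
  have h1 : merge_similar_items3 items1 items2
      = PySem.List.sorted2 ((xs.foldl pvStep2 PySem.Dict.empty).items)
          (fun p => p.1) (fun p => p.2) false := by
    rw [merge_similar_items3, pvDictA]
  rw [h1, pvItems_foldl]
  have hinj : ∀ a ∈ K.map (fun c => (c, pvS xs c)), ∀ b ∈ K.map (fun c => (c, pvS xs c)),
      (fun p : Int × Int => p.1) a = (fun p : Int × Int => p.1) b → a = b := by
    intro a ha b hb hab
    rcases List.mem_map.mp ha with ⟨c1, _, rfl⟩
    rcases List.mem_map.mp hb with ⟨c2, _, rfl⟩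
    simp only at hab
    rw [hab]
  rw [pvSorted2_eq_sorted _ _ _ hinj]
  apply PySem.List.sorted_eq_of_perm_of_pairwise_lt
  · exact List.Perm.map _ (PySem.List.sorted_perm K (fun x => x) false)
  · have := PySem.List.sorted_ofList_pairwise_lt (xs.map pvKey)
    rw [← hK] at this
    exact List.pairwise_map.mpr (by simpa using this)

-- ===== VERDICT (by name: the statement is the Claim_ definition above) =====
theorem merge_similar_items3_spec : Claim_equal_merge_similar_items3 := by
  intro items1 items2 _ _
  unfold Spec_merge_similar_items3
  rw [pvA_eq, pvAlt_eq]
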